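-- pv_equiv track=rewrite | github.com/LetsZiggy/tailwindcss-class-sorter | tailwindcss-Class-Sorter.py | merge_dynamic_variant_parts
-- ===== SOURCE A (Python) =====
-- from typing import Any, Dict, List, Literal, Pattern, Tuple, TypedDict, Union, cast
--
-- def merge_dynamic_variant_parts(class_name: List[str]) -> List[str]:
-- 	bracket_open = False
-- 	merged = []
--
-- 	for part in class_name:
-- 		if bracket_open is True:
-- 			merged[-1] = f"{merged[-1]}:{part}"
--
-- 			if part.endswith("]"):
-- 				bracket_open = False
-- 		else:
-- 			merged.append(part)
--
-- 			if ("-[" in part or part.startswith("[")) and part.rfind("]") == -1: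
-- 				bracket_open = True
--
-- 	return merged
-- ===== SOURCE B (Python) =====
-- def merge_dynamic_variant_parts(class_name):
-- 	merged = []
-- 	i = 0
-- 	n = len(class_name)
-- 	while i < n:
-- 		part = class_name[i]
-- 		i += 1
-- 		if ("-[" in part or part.startswith("[")) and part.rfind("]") == -1:
-- 			buf = part
-- 			while i < n:
-- 				nxt = class_name[i]
-- 				i += 1
-- 				buf = f"{buf}:{nxt}"
-- 				if nxt.endswith("]"):
-- 					break
-- 			merged.append(buf)
-- 		else:
-- 			merged.append(part)
-- 	return merged
-- ===== Notes on version B (the rewrite author's own statement) =====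
-- stated objective: alternative
-- what changed: Replaces A's carried bracket_open boolean flag (which rewrites merged[-1] on every continuation part) with explicit group consumption: when a part opens an unclosed bracket, an inner loop accumulates the whole group into a local buffer until a closing part (or end of list) and appends it once.
import Mathlib
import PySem

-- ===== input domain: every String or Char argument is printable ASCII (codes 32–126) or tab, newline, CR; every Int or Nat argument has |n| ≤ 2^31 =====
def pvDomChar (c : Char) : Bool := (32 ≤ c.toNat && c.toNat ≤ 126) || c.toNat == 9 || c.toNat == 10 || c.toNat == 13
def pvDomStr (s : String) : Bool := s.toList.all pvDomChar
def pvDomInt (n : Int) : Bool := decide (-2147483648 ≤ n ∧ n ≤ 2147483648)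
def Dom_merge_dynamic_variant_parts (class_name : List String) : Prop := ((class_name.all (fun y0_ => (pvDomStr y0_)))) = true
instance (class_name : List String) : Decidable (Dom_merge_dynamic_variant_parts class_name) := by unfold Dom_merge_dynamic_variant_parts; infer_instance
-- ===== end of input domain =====

-- B differs from A by a different decomposition (explicit inner group-consumption loop instead of a
-- carried bracket_open flag rewriting merged[-1]); return values proved equal on all inputs.

-- ===== PORT A =====
-- A's for-loop over the parts, carrying (bracket_open, merged); merged[-1] is read with getLastD
-- (when bracket_open is true, merged is nonempty on every reachable state, so Python never raises).
def mergeA_loop (bracket_open : Bool) (merged : List String) : List String → List String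
  | [] => merged
  | part :: rest =>
    if bracket_open then
      let merged' := merged.dropLast ++ [merged.getLastD "" ++ ":" ++ part]
      if PySem.Str.endswith part "]" then mergeA_loop false merged' rest
      else mergeA_loop true merged' rest
    else
      let merged' := merged ++ [part]
      if (PySem.Str.isIn "-[" part || PySem.Str.startswith part "[")
          && PySem.Str.rfind part "]" == -1 then
        mergeA_loop true merged' rest
      else mergeA_loop false merged' rest

def merge_dynamic_variant_parts (class_name : List String) : List String :=
  mergeA_loop false [] class_name

-- ===== PORT B =====
-- B's inner while-loop: accumulate the group into buf until a closing part or the end of the list;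
-- returns the finished buffer and the unconsumed remainder.
def mergeB_consume (buf : String) : List String → String × List String
  | [] => (buf, [])
  | nxt :: rest =>
    let buf' := buf ++ ":" ++ nxt
    if PySem.Str.endswith nxt "]" then (buf', rest) else mergeB_consume buf' rest

-- the inner loop consumes parts: cited by mergeB_go's decreasing_by
theorem mergeB_consume_len (buf : String) (l : List String) :
    (mergeB_consume buf l).2.length ≤ l.length := by
  induction l generalizing buf with
  | nil => simp [mergeB_consume]
  | cons q t ih =>
    simp only [mergeB_consume]
    split
    · simp
    · exact le_trans (ih _) (by simp)

-- B's outer while-loop over the unconsumed parts.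
def mergeB_go : List String → List String
  | [] => []
  | part :: rest =>
    if (PySem.Str.isIn "-[" part || PySem.Str.startswith part "[")
        && PySem.Str.rfind part "]" == -1 then
      let r := mergeB_consume part rest
      r.1 :: mergeB_go r.2
    else part :: mergeB_go rest
termination_by parts => parts.length
decreasing_by
  · simpa using Nat.lt_succ_of_le (mergeB_consume_len part rest)
  · simp

def merge_dynamic_variant_parts_alt (class_name : List String) : List String :=
  mergeB_go class_name

-- ===== PRECONDITION & SPEC =====
def Spec_merge_dynamic_variant_parts (class_name : List String) (out : List String) : Prop := out = merge_dynamic_variant_parts_alt class_name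
instance (class_name : List String) (out : List String) : Decidable (Spec_merge_dynamic_variant_parts class_name out) := by unfold Spec_merge_dynamic_variant_parts; infer_instance

-- ===== CLAIM (what is proved, stated in full; the proofs are below) =====
def Claim_equal_merge_dynamic_variant_parts : Prop := ∀ (class_name : List String), Dom_merge_dynamic_variant_parts class_name → Spec_merge_dynamic_variant_parts class_name (merge_dynamic_variant_parts class_name)

-- ===== LEMMAS AND PROOFS =====

-- Combined loop invariant: with the flag down A's loop appends B's result to the accumulator;
-- with the flag up and accumulator m ++ [b], A's rewriting of merged[-1] computes exactly
-- B's group consumption of b followed by the outer loop on the remainder.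
theorem mergeA_eq_B (parts : List String) :
    (∀ m, mergeA_loop false m parts = m ++ mergeB_go parts) ∧
    (∀ m b, mergeA_loop true (m ++ [b]) parts =
      m ++ ((mergeB_consume b parts).1 :: mergeB_go (mergeB_consume b parts).2)) := by
  induction parts with
  | nil => simp [mergeA_loop, mergeB_go, mergeB_consume]
  | cons part rest ih =>
    constructor
    · intro m
      simp only [mergeA_loop, mergeB_go]
      by_cases hc : ((PySem.Str.isIn "-[" part || PySem.Str.startswith part "[")
          && PySem.Str.rfind part "]" == -1) = true
      · simp only [hc, Bool.false_eq_true, if_false]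
        exact ih.2 m part
      · simp only [hc, Bool.false_eq_true, if_true, if_false]
        rw [ih.1 (m ++ [part])]
        simp
    · intro m b
      simp only [mergeA_loop, mergeB_consume, List.dropLast_concat, List.getLastD_concat]
      by_cases he : PySem.Str.endswith part "]" = true
      · simp only [he, if_true]
        rw [ih.1 (m ++ [b ++ ":" ++ part])]
        simp
      · simp only [he, Bool.false_eq_true, if_true, if_false]
        rw [ih.2 m (b ++ ":" ++ part)]

-- ===== VERDICT (by name: the statement is the Claim_ definition above) =====
theorem merge_dynamic_variant_parts_spec : Claim_equal_merge_dynamic_variant_parts := by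
  intro class_name _
  unfold Spec_merge_dynamic_variant_parts merge_dynamic_variant_parts merge_dynamic_variant_parts_alt
  simpa using (mergeA_eq_B class_name).1 []
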